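-- pv_equiv track=rewrite | github.com/JackRiebel/Circuit-Code | circuit_agent/mcp/converter.py | filter_tools_by_toolset
-- ===== SOURCE A (Python) =====
-- from typing import Dict, Any, List
--
-- def filter_tools_by_toolset(
--     tools: List[Dict[str, Any]],
--     enabled_toolsets: List[str]
-- ) -> List[Dict[str, Any]]:
--     """
--     Filter MCP tools by enabled toolsets.
--
--     Tools are typically named like "toolset_action" (e.g., "repos_create", "issues_list").
--     If enabled_toolsets is empty, all tools are returned.
--     """
--     if not enabled_toolsets:
--         return tools
--
--     filtered = []
--     for tool in tools:
--         name = tool.get("name", "")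
--         # Check if tool name starts with any enabled toolset
--         for toolset in enabled_toolsets:
--             if name.startswith(f"{toolset}_") or name == toolset:
--                 filtered.append(tool)
--                 break
--
--     return filtered
-- ===== SOURCE B (Python) =====
-- def filter_tools_by_toolset(tools, enabled_toolsets):
--     """
--     Filter MCP tools by enabled toolsets.
--
--     Set-based: instead of scanning all toolsets per tool, look up the name and
--     each prefix cut at an underscore in a set built once.
--     """
--     if not enabled_toolsets:
--         return tools
--     enabled = set(enabled_toolsets)
--     return [
--         tool for tool in tools
--         if (name := tool.get("name", "")) in enabled
--         or any(name[:i] in enabled for i, ch in enumerate(name) if ch == "_")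
--     ]
-- ===== Notes on version B (the rewrite author's own statement) =====
-- stated objective: faster
-- what changed: Replaces the per-tool inner scan over all toolsets (startswith each) by a set of toolsets built once and membership lookups on the name and its underscore-cut prefixes.
import Mathlib
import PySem

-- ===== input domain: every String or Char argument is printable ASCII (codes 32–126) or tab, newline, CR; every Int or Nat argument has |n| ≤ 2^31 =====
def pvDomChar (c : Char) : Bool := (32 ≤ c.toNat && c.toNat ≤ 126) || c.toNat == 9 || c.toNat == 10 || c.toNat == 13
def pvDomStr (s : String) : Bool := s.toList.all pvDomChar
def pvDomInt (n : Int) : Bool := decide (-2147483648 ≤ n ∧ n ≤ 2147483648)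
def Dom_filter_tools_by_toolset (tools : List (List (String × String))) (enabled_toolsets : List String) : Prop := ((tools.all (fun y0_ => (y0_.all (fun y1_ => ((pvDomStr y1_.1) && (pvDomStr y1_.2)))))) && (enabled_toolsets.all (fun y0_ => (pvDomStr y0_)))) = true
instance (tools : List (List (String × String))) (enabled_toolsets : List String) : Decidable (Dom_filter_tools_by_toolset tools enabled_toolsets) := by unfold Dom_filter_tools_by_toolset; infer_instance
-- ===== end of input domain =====

-- B replaces A's per-tool scan over all toolsets by a set of toolsets built once and
-- membership lookups on the name and its underscore-cut prefixes (objective: faster).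

-- ===== PORT A =====
-- inner 'for toolset in enabled_toolsets: … break' loop: true iff some toolset matches
def pvMatchA (name : String) : List String → Bool
  | [] => false
  | t :: rest =>
      if PySem.Str.startswith name (t ++ "_") || name == t then true
      else pvMatchA name rest

def filter_tools_by_toolset (tools : List (List (String × String))) (enabled_toolsets : List String) : List (List (String × String)) :=
  if enabled_toolsets = [] then tools
  else
    tools.foldl
      (fun filtered tool =>
        if pvMatchA (PySem.Dict.getD (PySem.Dict.mk tool) "name" "") enabled_toolsets then filtered ++ [tool]
        else filtered)
      []

-- ===== PORT B =====
-- name in enabled, or some prefix of name cut at an '_' is in enabled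
def pvMatchB (enabled : PySem.Set String) (name : String) : Bool :=
  PySem.Set.contains enabled name ||
    (PySem.List.enumerate name.toList).any
      (fun p => p.2 == '_' && PySem.Set.contains enabled (PySem.Str.slice name none (some p.1)))

def filter_tools_by_toolset_alt (tools : List (List (String × String))) (enabled_toolsets : List String) : List (List (String × String)) :=
  if enabled_toolsets = [] then tools
  else
    let enabled := PySem.Set.ofList enabled_toolsets
    tools.filter (fun tool => pvMatchB enabled (PySem.Dict.getD (PySem.Dict.mk tool) "name" ""))

-- ===== PRECONDITION & SPEC =====
def Spec_filter_tools_by_toolset (tools : List (List (String × String))) (enabled_toolsets : List String) (out : List (List (String × String))) : Prop := out = filter_tools_by_toolset_alt tools enabled_toolsets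
instance (tools : List (List (String × String))) (enabled_toolsets : List String) (out : List (List (String × String))) : Decidable (Spec_filter_tools_by_toolset tools enabled_toolsets out) := by unfold Spec_filter_tools_by_toolset; infer_instance

-- ===== CLAIM (what is proved, stated in full; the proofs are below) =====
def Claim_equal_filter_tools_by_toolset : Prop := ∀ (tools : List (List (String × String))) (enabled_toolsets : List String), Dom_filter_tools_by_toolset tools enabled_toolsets → Spec_filter_tools_by_toolset tools enabled_toolsets (filter_tools_by_toolset tools enabled_toolsets)

-- ===== LEMMAS AND PROOFS =====

-- A's inner break-loop is an 'any' over the toolsets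
theorem pvMatchA_eq_any (name : String) (ts : List String) :
    pvMatchA name ts =
      ts.any (fun t => PySem.Str.startswith name (t ++ "_") || name == t) := by
  induction ts with
  | nil => rfl
  | cons t rest ih =>
      cases h : (PySem.Str.startswith name (t ++ "_") || name == t) with
      | true => simp only [pvMatchA, List.any_cons, h]; simp
      | false => simp only [pvMatchA, List.any_cons, h, ih]; simp

-- cs starts with ts ++ ['_'] iff some index i carries '_' with ts before it
theorem pv_prefix_underscore_iff (cs ts : List Char) :
    (ts ++ ['_']) <+: cs ↔
      ∃ (i : Nat) (h : i < cs.length), cs[i] = '_' ∧ cs.take i = ts := by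
  constructor
  · intro hpre
    have hlen : ts.length + 1 ≤ cs.length := by
      have := hpre.length_le; simpa using this
    have htk : cs.take (ts.length + 1) = ts ++ ['_'] := by
      have h0 := List.prefix_iff_eq_take.mp hpre
      simpa using h0.symm
    have h1 : cs.take (ts.length + 1) = cs.take ts.length ++ [cs[ts.length]] := by
      rw [List.take_add_one, List.getElem?_eq_getElem (by omega)]; rfl
    have h2 : cs.take ts.length ++ [cs[ts.length]] = ts ++ ['_'] := h1 ▸ htk
    have hl : (cs.take ts.length).length = ts.length := by simp; omega
    refine ⟨ts.length, by omega, ?_, (List.append_inj h2 hl).1⟩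
    have := (List.append_inj h2 hl).2
    simpa using this
  · rintro ⟨i, hi, hc, rfl⟩
    have : cs.take i ++ ['_'] = cs.take (i + 1) := by
      rw [List.take_add_one, List.getElem?_eq_getElem hi, hc]; rfl
    rw [this]
    exact List.take_prefix _ _

theorem pv_slice_eq_take (name : String) (i : Nat) :
    (PySem.Str.slice name none (some ((0 : Int) + i))).toList = name.toList.take i := by
  rw [show ((0 : Int) + i) = (i : Int) by omega]
  simp [PySem.Str.toList_slice, PySem.List.slice_to_natCast]

theorem pv_startswith_underscore (name t : String) :
    PySem.Str.startswith name (t ++ "_") = true ↔ (t.toList ++ ['_']) <+: name.toList := by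
  rw [PySem.Str.startswith_eq, show (t ++ "_").toList = t.toList ++ ['_'] by simp,
    PySem.Chars.startswith_iff]

theorem pvMatch_eq (name : String) (ts : List String) :
    pvMatchA name ts = pvMatchB (PySem.Set.ofList ts) name := by
  rcases hA : pvMatchA name ts with _ | _ <;>
  rcases hB : pvMatchB (PySem.Set.ofList ts) name with _ | _ <;> try rfl
  · -- A false, B true
    exfalso
    rw [pvMatchA_eq_any] at hA
    simp only [List.any_eq_false] at hA
    unfold pvMatchB at hB
    simp only [Bool.or_eq_true, List.any_eq_true, Bool.and_eq_true, beq_iff_eq] at hB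
    rcases hB with hc | ⟨p, hp, hund, hsin⟩
    · have hm : name ∈ ts := by simpa [PySem.Set.mem_ofList] using hc
      exact hA name hm (by rw [Bool.or_eq_true]; exact Or.inr (by simp))
    · rcases (PySem.List.mem_enumerate_iff name.toList 0 p).mp hp with ⟨k, hk, rfl⟩
      simp only at hund hsin
      set t := PySem.Str.slice name none (some ((0 : Int) + k)) with ht
      have hmem : t ∈ ts := by simpa [PySem.Set.mem_ofList] using hsin
      have hsw : PySem.Str.startswith name (t ++ "_") = true :=
        (pv_startswith_underscore name t).mpr
          ((pv_prefix_underscore_iff name.toList t.toList).mpr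
            ⟨k, hk, hund, (pv_slice_eq_take name k).symm⟩)
      exact hA t hmem (by rw [Bool.or_eq_true]; exact Or.inl hsw)
  · -- A true, B false
    exfalso
    rw [pvMatchA_eq_any] at hA
    rcases List.any_eq_true.mp hA with ⟨t, hmem, hcond⟩
    unfold pvMatchB at hB
    simp only [Bool.or_eq_false_iff, List.any_eq_false, Bool.and_eq_true, beq_iff_eq] at hB
    obtain ⟨hc, hall⟩ := hB
    rw [Bool.or_eq_true] at hcond
    rcases hcond with hsw | heq
    · rcases (pv_prefix_underscore_iff name.toList t.toList).mp
        ((pv_startswith_underscore name t).mp hsw) with ⟨i, hi, hund, htake⟩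
      have hpmem : ((0 : Int) + i, name.toList[i]) ∈ PySem.List.enumerate name.toList 0 :=
        (PySem.List.mem_enumerate_iff name.toList 0 _).mpr ⟨i, hi, rfl⟩
      apply hall _ hpmem
      refine ⟨hund, ?_⟩
      have hts : PySem.Str.slice name none (some ((0 : Int) + i)) = t := by
        apply String.toList_injective
        rw [pv_slice_eq_take, htake]
      rw [hts]
      simpa [PySem.Set.mem_ofList] using hmem
    · have hne : name = t := by simpa using heq
      subst hne
      simp [PySem.Set.mem_ofList] at hc
      exact hc hmem

-- ===== VERDICT (by name: the statement is the Claim_ definition above) =====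
theorem filter_tools_by_toolset_spec : Claim_equal_filter_tools_by_toolset := by
  intro tools ets _
  unfold Spec_filter_tools_by_toolset filter_tools_by_toolset filter_tools_by_toolset_alt
  by_cases h : ets = []
  · simp [h]
  · simp only [h, if_false]
    rw [PySem.List.foldl_append_if_eq_filter]
    simp only [List.nil_append]
    apply List.filter_congr
    intro tool _
    exact pvMatch_eq (PySem.Dict.getD (PySem.Dict.mk tool) "name" "") ets
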